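-- pv_equiv track=rewrite | github.com/Franciscoj04/-LFP-VJ-202006716-P1 | Proyecto1/Principal.py | AFDCOMENTMULTI
-- ===== SOURCE A (Python) =====
-- def AFDCOMENTMULTI(lexema):
--     estado=0
--     aceptacion=[4]
--
--     for multi in lexema:
--         if estado == 0:
--             if multi == "/":
--                 estado = 1
--             else:
--                 estado = -1
--         elif estado == 1:
--             if multi == "*":
--                 estado = 2
--             else:
--                 estado = -1
--         elif estado == 2:
--             if multi != '*':
--                 estado = 2
--             elif multi == '*':
--                 estado = 3
--             else:
--                 estado = -1
--         elif estado == 3: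
--             if multi == "*":
--                 estado = 3
--             elif multi != '*' and multi != '/':
--                 estado = 2
--             elif multi == "/":
--                 estado = 4
--             else:
--                 estado = -1
--
--         elif estado == 4:
--             estado = -1
--
--         if estado == -1:
--             return False
--
--     return estado in aceptacion
-- ===== SOURCE B (Python) =====
-- def AFDCOMENTMULTI(lexema):
--     # Language: "/*" + body + "*/" where body contains no "*/".
--     # Equivalently: starts with "/*", length >= 4, and the first "*/" at
--     # position >= 2 ends the string exactly.
--     if not lexema.startswith("/*") or len(lexema) < 4:
--         return False
--     return lexema.find("*/", 2) == len(lexema) - 2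
-- ===== Notes on version B (the rewrite author's own statement) =====
-- stated objective: simpler
-- what changed: Replaced the hand-rolled 5-state DFA loop with direct string operations: check the '/*' prefix and minimum length, then require the first '*/' found from index 2 to end the string exactly.
import Mathlib
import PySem

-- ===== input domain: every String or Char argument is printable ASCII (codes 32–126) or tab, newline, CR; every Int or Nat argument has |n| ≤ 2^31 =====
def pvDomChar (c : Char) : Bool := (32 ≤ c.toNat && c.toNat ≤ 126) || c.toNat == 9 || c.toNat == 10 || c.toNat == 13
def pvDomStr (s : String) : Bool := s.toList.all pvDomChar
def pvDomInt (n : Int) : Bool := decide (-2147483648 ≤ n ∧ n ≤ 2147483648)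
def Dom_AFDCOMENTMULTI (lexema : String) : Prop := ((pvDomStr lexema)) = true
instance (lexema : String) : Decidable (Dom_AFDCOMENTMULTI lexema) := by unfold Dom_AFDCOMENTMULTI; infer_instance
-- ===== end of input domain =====

-- B replaces A's hand-rolled 5-state DFA loop by direct string operations
-- ('/*' prefix + length check + first '*/' from index 2 must end the string); objective: simpler.

-- ===== PORT A =====
-- the DFA loop of A: one step per character, early `return False` on estado = -1
def pvALoop : Int → List Char → Bool
  | estado, [] => [(4 : Int)].contains estado
  | estado, multi :: rest =>
      let estado' : Int :=
        if estado == 0 then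
          (if multi == '/' then 1 else -1)
        else if estado == 1 then
          (if multi == '*' then 2 else -1)
        else if estado == 2 then
          (if multi != '*' then 2 else if multi == '*' then 3 else -1)
        else if estado == 3 then
          (if multi == '*' then 3
           else if multi != '*' && multi != '/' then 2
           else if multi == '/' then 4
           else -1)
        else if estado == 4 then -1
        else estado
      if estado' == -1 then false else pvALoop estado' rest

def AFDCOMENTMULTI (lexema : String) : Bool := pvALoop 0 lexema.toList

-- ===== PORT B =====
def AFDCOMENTMULTI_alt (lexema : String) : Bool :=
  if !(PySem.Str.startswith lexema "/*") || PySem.Str.len lexema < 4 then false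
  else PySem.Str.findFrom lexema "*/" 2 none == PySem.Str.len lexema - 2

-- ===== PRECONDITION & SPEC =====
def Spec_AFDCOMENTMULTI (lexema : String) (out : Bool) : Prop := out = AFDCOMENTMULTI_alt lexema
instance (lexema : String) (out : Bool) : Decidable (Spec_AFDCOMENTMULTI lexema out) := by unfold Spec_AFDCOMENTMULTI; infer_instance

-- ===== CLAIM (what is proved, stated in full; the proofs are below) =====
def Claim_equal_AFDCOMENTMULTI : Prop := ∀ (lexema : String), Dom_AFDCOMENTMULTI lexema → Spec_AFDCOMENTMULTI lexema (AFDCOMENTMULTI lexema)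

-- ===== LEMMAS AND PROOFS =====

-- the language accepted from state 2: a body with no "*/", then a final "*/"
def pvQ (l : List Char) : Prop := ∃ b, l = b ++ ['*', '/'] ∧ ¬ (['*', '/'] <:+: b)

lemma pvALoop_four (l : List Char) : pvALoop 4 l = decide (l = []) := by
  cases l <;> simp [pvALoop]

lemma pvALoop_two (c : Char) (cs : List Char) :
    pvALoop 2 (c :: cs) = if c = '*' then pvALoop 3 cs else pvALoop 2 cs := by
  by_cases h : c = '*' <;> simp [pvALoop, h]

lemma pvALoop_three (c : Char) (cs : List Char) :
    pvALoop 3 (c :: cs) =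
      if c = '*' then pvALoop 3 cs
      else if c = '/' then pvALoop 4 cs
      else pvALoop 2 cs := by
  by_cases h : c = '*'
  · simp [pvALoop, h]
  · by_cases h2 : c = '/' <;> simp [pvALoop, h, h2]

lemma pvQ_nil : ¬ pvQ [] := by
  rintro ⟨b, hb, -⟩; simp at hb

lemma pvQ_cons_of_ne (c : Char) (cs : List Char) (hc : c ≠ '*') :
    pvQ (c :: cs) ↔ pvQ cs := by
  constructor
  · rintro ⟨b, hb, hno⟩
    cases b with
    | nil => simp at hb; exact absurd hb.1 hc
    | cons b0 bt =>
        simp only [List.cons_append, List.cons.injEq] at hb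
        refine ⟨bt, hb.2, fun h => hno ?_⟩
        exact (List.infix_cons_iff).mpr (Or.inr h)
  · rintro ⟨b, hb, hno⟩
    refine ⟨c :: b, by simp [hb], fun h => ?_⟩
    rcases (List.infix_cons_iff).mp h with h | h
    · rcases (List.cons_prefix_cons).mp h with ⟨h1, -⟩; exact hc h1.symm
    · exact hno h

lemma pvQ_star_star (cs : List Char) : pvQ ('*' :: '*' :: cs) ↔ pvQ ('*' :: cs) := by
  constructor
  · rintro ⟨b, hb, hno⟩
    cases b with
    | nil => simp at hb
    | cons b0 bt =>
        simp only [List.cons_append, List.cons.injEq] at hb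
        refine ⟨bt, hb.2, fun h => hno ?_⟩
        exact (List.infix_cons_iff).mpr (Or.inr h)
  · rintro ⟨b, hb, hno⟩
    refine ⟨'*' :: b, by simp [← hb], fun h => ?_⟩
    rcases (List.infix_cons_iff).mp h with h | h
    · rcases (List.cons_prefix_cons).mp h with ⟨-, h2⟩
      cases b with
      | nil => simp at hb; simp at h2
      | cons b0 bt =>
          simp only [List.cons_append, List.cons.injEq] at hb
          rcases List.cons_prefix_cons.mp (hb.1 ▸ h2) with ⟨h3, -⟩
          exact absurd h3 (by decide)
    · exact hno h

lemma pvQ_star_slash (cs : List Char) : pvQ ('*' :: '/' :: cs) ↔ cs = [] := by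
  constructor
  · rintro ⟨b, hb, hno⟩
    cases b with
    | nil => simp at hb; exact hb
    | cons b0 bt =>
        simp only [List.cons_append, List.cons.injEq] at hb
        cases bt with
        | nil => simp at hb
        | cons b1 bt2 =>
            simp only [List.cons_append, List.cons.injEq] at hb
            exfalso
            apply hno
            rw [hb.1, hb.2.1]
            exact (List.infix_cons_iff).mpr (Or.inl (by simp))
  · rintro rfl
    exact ⟨[], rfl, by simp⟩

lemma pvQ_star_other (c : Char) (cs : List Char) (h1 : c ≠ '*') (h2 : c ≠ '/') :
    pvQ ('*' :: c :: cs) ↔ pvQ cs := by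
  constructor
  · rintro ⟨b, hb, hno⟩
    cases b with
    | nil => simp at hb; exact absurd hb.1 (by simpa using h2)
    | cons b0 bt =>
        simp only [List.cons_append, List.cons.injEq] at hb
        cases bt with
        | nil => simp at hb; exact absurd hb.2.1 h1
        | cons b1 bt2 =>
            simp only [List.cons_append, List.cons.injEq] at hb
            refine ⟨bt2, hb.2.2, fun h => hno ?_⟩
            exact (List.infix_cons_iff).mpr (Or.inr ((List.infix_cons_iff).mpr (Or.inr h)))
  · rintro ⟨b, hb, hno⟩
    refine ⟨'*' :: c :: b, by simp [hb], fun h => ?_⟩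
    rcases (List.infix_cons_iff).mp h with h | h
    · rcases (List.cons_prefix_cons).mp h with ⟨-, h3⟩
      rcases (List.cons_prefix_cons).mp h3 with ⟨h4, -⟩
      exact h2 h4.symm
    · rcases (List.infix_cons_iff).mp h with h | h
      · rcases (List.cons_prefix_cons).mp h with ⟨h4, -⟩
        exact h1 h4.symm
      · exact hno h

lemma pvALoop_char (l : List Char) :
    (pvALoop 2 l = true ↔ pvQ l) ∧ (pvALoop 3 l = true ↔ pvQ ('*' :: l)) := by
  induction l with
  | nil =>
      constructor
      · simp [pvALoop]; exact fun h => pvQ_nil h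
      · simp [pvALoop]
        rintro ⟨b, hb, -⟩
        cases b with
        | nil => simp at hb
        | cons b0 bt => simp at hb
  | cons c cs ih =>
      constructor
      · rw [pvALoop_two]
        by_cases h : c = '*'
        · subst h; rw [if_pos rfl, ih.2]
        · rw [if_neg h, ih.1, pvQ_cons_of_ne c cs h]
      · rw [pvALoop_three]
        by_cases h : c = '*'
        · subst h; rw [if_pos rfl, ih.2, pvQ_star_star]
        · rw [if_neg h]
          by_cases h2 : c = '/'
          · subst h2; rw [if_pos rfl, pvALoop_four, pvQ_star_slash]
            simp
          · rw [if_neg h2, ih.1, pvQ_star_other c cs h h2]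

lemma prefix_getElem? (p y : List Char) (i : Nat) (h : p <+: y) (hi : i < p.length) : y[i]? = p[i]? := by
  obtain ⟨t, rfl⟩ := h
  exact List.getElem?_append_left hi

lemma infix_star_append (b : List Char) :
    (['*', '/'] <:+: (b ++ ['*'])) ↔ (['*', '/'] <:+: b) := by
  constructor
  · intro h
    obtain ⟨j, hj⟩ := (PySem.Chars.exists_prefix_drop_iff_isIn ['*','/'] (b ++ ['*'])).mpr
      ((PySem.Chars.isIn_iff_infix ['*','/'] (b ++ ['*'])).mpr h)
    have hlen : j + 2 ≤ b.length + 1 := by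
      have := hj.length_le
      simp at this
      omega
    by_cases hcase : j + 2 ≤ b.length
    · have hdrop : (b ++ ['*']).drop j = b.drop j ++ ['*'] :=
        List.drop_append_of_le_length (by omega)
      rw [hdrop] at hj
      have hpre : ['*','/'] <+: b.drop j := by
        refine (List.isPrefix_append_of_length ?_).mp hj
        simp; omega
      refine (PySem.Chars.isIn_iff_infix _ _).mp ?_
      exact (PySem.Chars.exists_prefix_drop_iff_isIn _ _).mp ⟨j, hpre⟩
    · exfalso
      have hj1 : j + 1 = b.length := by omega
      have h2 := prefix_getElem? _ _ 1 hj (by simp)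
      have hdrop : (b ++ ['*']).drop j = b.drop j ++ ['*'] :=
        List.drop_append_of_le_length (by omega)
      rw [hdrop] at h2
      have hbl : (b.drop j).length = 1 := by simp; omega
      rw [List.getElem?_append_right (by omega)] at h2
      simp [hbl] at h2
  · intro h
    exact h.trans (List.prefix_append b ['*']).isInfix

lemma pvQ_iff_find (l : List Char) :
    pvQ l ↔ (2 ≤ l.length ∧ PySem.Chars.find l ['*', '/'] = (l.length : Int) - 2) := by
  constructor
  · rintro ⟨b, rfl, hno⟩
    have hlen : (b ++ ['*','/']).length = b.length + 2 := by simp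
    have hocc : ['*','/'] <+: (b ++ ['*','/']).drop b.length := by
      rw [List.drop_append_of_le_length (le_refl _)]
      simp
    have hinf : ['*','/'] <:+: (b ++ ['*','/']) :=
      (PySem.Chars.isIn_iff_infix _ _).mp
        ((PySem.Chars.exists_prefix_drop_iff_isIn _ _).mp ⟨b.length, hocc⟩)
    have hnn : 0 ≤ PySem.Chars.find (b ++ ['*','/']) ['*','/'] :=
      (PySem.Chars.find_nonneg_iff _ _).mpr hinf
    obtain ⟨hpre, hmin⟩ := PySem.Chars.find_spec hnn
    set k := (PySem.Chars.find (b ++ ['*','/']) ['*','/']).toNat with hk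
    have hkb : k = b.length := by
      by_contra hne
      rcases Nat.lt_or_ge k b.length with hlt | hge
      · apply hno
        rw [← infix_star_append]
        have hdrop : (b ++ ['*','/']).drop k = (b ++ ['*']).drop k ++ ['/'] := by
          rw [List.drop_append_of_le_length (by omega),
              List.drop_append_of_le_length (by omega)]
          simp
        rw [hdrop] at hpre
        have : ['*','/'] <+: (b ++ ['*']).drop k := by
          refine (List.isPrefix_append_of_length ?_).mp hpre
          simp; omega
        exact (PySem.Chars.isIn_iff_infix _ _).mp
          ((PySem.Chars.exists_prefix_drop_iff_isIn _ _).mp ⟨k, this⟩)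
      · exact hmin b.length (by omega) hocc
    constructor
    · simp
    · have : PySem.Chars.find (b ++ ['*','/']) ['*','/'] = (k : Int) := by omega
      rw [this, hkb, hlen]
      push_cast
      ring
  · rintro ⟨h2, hf⟩
    have hnn : 0 ≤ PySem.Chars.find l ['*','/'] := by omega
    obtain ⟨hpre, hmin⟩ := PySem.Chars.find_spec hnn
    have hk : (PySem.Chars.find l ['*','/']).toNat = l.length - 2 := by omega
    rw [hk] at hpre hmin
    have hdl : (l.drop (l.length - 2)).length = 2 := by simp; omega
    have heq : l.drop (l.length - 2) = ['*','/'] :=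
      (List.IsPrefix.eq_of_length hpre (by simp [hdl])).symm
    refine ⟨l.take (l.length - 2), by rw [← heq, List.take_append_drop], fun hinf => ?_⟩
    obtain ⟨j, hj⟩ := (PySem.Chars.exists_prefix_drop_iff_isIn _ _).mpr
      ((PySem.Chars.isIn_iff_infix _ _).mpr hinf)
    have hjlen' : j + 2 ≤ l.length - 2 := by
      have := hj.length_le
      simp [List.length_drop, List.length_take] at this
      omega
    apply hmin j (by omega)
    have : (l.take (l.length - 2)).drop j <+: l.drop j := by
      rw [List.drop_take]
      exact List.take_prefix _ _
    exact hj.trans this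

-- A from state 2 as a Boolean, phrased through `find`
lemma pvALoop_two_eq_find (rest : List Char) :
    pvALoop 2 rest =
      decide (2 ≤ rest.length ∧ PySem.Chars.find rest ['*','/'] = (rest.length : Int) - 2) := by
  have h := (pvALoop_char rest).1.trans (pvQ_iff_find rest)
  cases hb : pvALoop 2 rest
  · rw [hb] at h
    simp only [Bool.false_eq_true, false_iff] at h
    simp [h]
  · rw [hb] at h
    simp only [true_iff] at h
    simp [h.1, h.2]

-- the whole function, at the level of character lists
lemma pvMain (l : List Char) :
    pvALoop 0 l =
      (if !(PySem.Chars.startswith l ['/','*']) || ((l.length : Int) < 4) then false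
       else decide (PySem.Chars.findFrom l ['*','/'] 2 none = (l.length : Int) - 2)) := by
  match l with
  | [] => decide
  | [c] =>
      have : pvALoop 0 [c] = false := by
        by_cases h : c = '/' <;> simp [pvALoop, h]
      rw [this]
      simp
  | c1 :: c2 :: rest =>
      by_cases h1 : c1 = '/'
      · by_cases h2 : c2 = '*'
        · subst h1; subst h2
          have hl : pvALoop 0 ('/' :: '*' :: rest) = pvALoop 2 rest := by
            simp [pvALoop]
          rw [hl, pvALoop_two_eq_find]
          have hsw : PySem.Chars.startswith ('/' :: '*' :: rest) ['/','*'] = true :=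
            (PySem.Chars.startswith_iff _ _).mpr (by simp)
          rw [hsw]
          have hlen : ('/' :: '*' :: rest).length = rest.length + 2 := by simp
          have hff := PySem.Chars.findFrom_natCast ('/' :: '*' :: rest) ['*','/'] 2
            (by simp)
          norm_num at hff
          by_cases hsmall : 2 ≤ rest.length
          · have hcond : (decide ((('/' :: '*' :: rest).length : Int) < 4)) = false := by
              simp [hlen]; omega
            rw [hcond]
            simp only [Bool.not_true, Bool.false_or, Bool.false_eq_true, if_false]
            rw [hff, hlen]
            by_cases hfind : PySem.Chars.find rest ['*','/'] = -1
            · rw [if_pos hfind]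
              have hlhs : ¬ (2 ≤ rest.length ∧
                  PySem.Chars.find rest ['*','/'] = (rest.length : Int) - 2) := by
                rintro ⟨hh, hf⟩; rw [hfind] at hf; omega
              simp [hlhs]
            · rw [if_neg hfind]
              rw [decide_eq_decide]
              push_cast
              constructor
              · rintro ⟨-, hf⟩; omega
              · intro hf; exact ⟨hsmall, by omega⟩
          · have hlhs : ¬ (2 ≤ rest.length ∧
                PySem.Chars.find rest ['*','/'] = (rest.length : Int) - 2) := by
              rintro ⟨hh, -⟩; omega
            have hcond : (decide ((('/' :: '*' :: rest).length : Int) < 4)) = true := by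
              simp [hlen]; omega
            rw [hcond]
            simp [hlhs]
        · subst h1
          have hl : pvALoop 0 ('/' :: c2 :: rest) = false := by
            simp [pvALoop, h2]
          have hsw : PySem.Chars.startswith ('/' :: c2 :: rest) ['/','*'] = false := by
            rw [Bool.eq_false_iff]
            intro h
            rcases List.cons_prefix_cons.mp ((PySem.Chars.startswith_iff _ _).mp h) with ⟨-, h3⟩
            rcases List.cons_prefix_cons.mp h3 with ⟨h4, -⟩
            exact h2 h4.symm
          rw [hl, hsw]
          simp
      · have hl : pvALoop 0 (c1 :: c2 :: rest) = false := by
          simp [pvALoop, h1]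
        have hsw : PySem.Chars.startswith (c1 :: c2 :: rest) ['/','*'] = false := by
          rw [Bool.eq_false_iff]
          intro h
          rcases List.cons_prefix_cons.mp ((PySem.Chars.startswith_iff _ _).mp h) with ⟨h3, -⟩
          exact h1 h3.symm
        rw [hl, hsw]
        simp

-- ===== VERDICT (by name: the statement is the Claim_ definition above) =====
theorem AFDCOMENTMULTI_spec : Claim_equal_AFDCOMENTMULTI := by
  intro lexema _
  unfold Spec_AFDCOMENTMULTI AFDCOMENTMULTI AFDCOMENTMULTI_alt
  rw [pvMain lexema.toList]
  simp [pysem, Bool.beq_eq_decide_eq]
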